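-- pv_equiv track=rewrite | github.com/SADIKAvsar/TumProjeler | LoABotV6_0/analytics.py | _decision_type_breakdown
-- ===== SOURCE A (Python) =====
-- from typing import Dict, List, Optional
-- from collections import defaultdict
--
-- def _decision_type_breakdown(history: List[Dict]) -> Dict:
--     """Break down decisions by type."""
--     breakdown = defaultdict(lambda: {'ai': 0, 'rules': 0})
--
--     for entry in history:
--         dtype = entry.get('type', 'unknown')
--         source = entry.get('source', 'unknown')
--         if source in ('ai', 'rules'):
--             breakdown[dtype][source] += 1
--
--     return dict(breakdown)
-- ===== SOURCE B (Python) =====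
-- from typing import Dict, List
--
--
-- def _decision_type_breakdown(history: List[Dict]) -> Dict:
--     """Break down decisions by type: tabulate the valid (type, source) pairs,
--     then build each row by counting, keyed by first-occurrence order of types."""
--     pairs = [(e.get('type', 'unknown'), e.get('source', 'unknown')) for e in history]
--     valid = [p for p in pairs if p[1] in ('ai', 'rules')]
--     types = []
--     for t, _ in valid:
--         if t not in types:
--             types.append(t)
--     return {t: {'ai': sum(1 for (u, s) in valid if u == t and s == 'ai'),
--                 'rules': sum(1 for (u, s) in valid if u == t and s == 'rules')}
--             for t in types}
-- ===== Notes on version B (the rewrite author's own statement) =====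
-- stated objective: alternative
-- what changed: A makes one pass mutating a defaultdict of nested counter dicts in place; B first extracts the flat list of valid (type, source) pairs, derives the ordered distinct type keys, and then builds each output row by counting occurrences in that flat table.
import Mathlib
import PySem

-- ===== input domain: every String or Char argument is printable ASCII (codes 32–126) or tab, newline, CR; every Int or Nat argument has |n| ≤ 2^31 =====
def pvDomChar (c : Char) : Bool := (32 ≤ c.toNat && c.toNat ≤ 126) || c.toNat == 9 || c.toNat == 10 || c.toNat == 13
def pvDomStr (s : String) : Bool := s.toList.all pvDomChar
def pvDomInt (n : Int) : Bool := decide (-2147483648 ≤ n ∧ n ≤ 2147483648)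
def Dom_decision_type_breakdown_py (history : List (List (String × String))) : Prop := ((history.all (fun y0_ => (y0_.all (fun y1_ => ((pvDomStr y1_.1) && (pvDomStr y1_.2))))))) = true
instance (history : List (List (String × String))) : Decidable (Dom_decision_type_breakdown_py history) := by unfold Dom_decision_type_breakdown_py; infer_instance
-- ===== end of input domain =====

-- B replaces A's single mutating pass over a defaultdict of nested counters by
-- tabulate-then-count: extract the valid (type, source) pairs, dedup the type
-- keys in first-occurrence order, and build each row by counting in the flat table.

-- ===== PORT A =====
def decision_type_breakdown_py (history : List (List (String × String))) : List (String × List (String × Int)) :=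
  let bd : PySem.Dict String (PySem.Dict String Int) :=
    history.foldl (fun bd entry =>
      let dtype := (PySem.Dict.ofList entry).getD "type" "unknown"
      let source := (PySem.Dict.ofList entry).getD "source" "unknown"
      if source == "ai" || source == "rules" then
        bd.insert dtype ((bd.getD dtype (PySem.Dict.ofList [("ai", 0), ("rules", 0)])).modify source 0 (· + 1))
      else bd) PySem.Dict.empty
  bd.items.map (fun p => (p.1, p.2.items))

-- ===== PORT B =====
def decision_type_breakdown_py_alt (history : List (List (String × String))) : List (String × List (String × Int)) :=
  let pairs := history.map (fun e =>
    ((PySem.Dict.ofList e).getD "type" "unknown", (PySem.Dict.ofList e).getD "source" "unknown"))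
  let valid := pairs.filter (fun p => p.2 == "ai" || p.2 == "rules")
  let types := valid.foldl (fun acc p => if acc.contains p.1 then acc else acc ++ [p.1]) ([] : List String)
  types.map (fun t =>
    (t, [("ai", (valid.countP (fun p => p.1 == t && p.2 == "ai") : Int)),
         ("rules", (valid.countP (fun p => p.1 == t && p.2 == "rules") : Int))]))

-- ===== PRECONDITION & SPEC =====
def Spec_decision_type_breakdown_py (history : List (List (String × String))) (out : List (String × List (String × Int))) : Prop := out = decision_type_breakdown_py_alt history
instance (history : List (List (String × String))) (out : List (String × List (String × Int))) : Decidable (Spec_decision_type_breakdown_py history out) := by unfold Spec_decision_type_breakdown_py; infer_instance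

-- ===== CLAIM (what is proved, stated in full; the proofs are below) =====
def Claim_equal_decision_type_breakdown_py : Prop := ∀ (history : List (List (String × String))), Dom_decision_type_breakdown_py history → Spec_decision_type_breakdown_py history (decision_type_breakdown_py history)

-- ===== LEMMAS AND PROOFS =====

-- the (type, source) pair an entry contributes
def pvPair (e : List (String × String)) : String × String :=
  ((PySem.Dict.ofList e).getD "type" "unknown", (PySem.Dict.ofList e).getD "source" "unknown")

-- the valid pairs of a history
def pvValid (history : List (List (String × String))) : List (String × String) :=
  (history.map pvPair).filter (fun p => p.2 == "ai" || p.2 == "rules")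

-- the output row for type t given the flat valid-pair table v
def pvRow (v : List (String × String)) (t : String) : List (String × Int) :=
  [("ai", (v.countP (fun p => p.1 == t && p.2 == "ai") : Int)),
   ("rules", (v.countP (fun p => p.1 == t && p.2 == "rules") : Int))]

-- the breakdown dict described by the flat table v
def pvSpec (v : List (String × String)) : PySem.Dict String (PySem.Dict String Int) :=
  PySem.Dict.mk ((PySem.Set.ofList (v.map Prod.fst)).map (fun t => (t, PySem.Dict.mk (pvRow v t))))

-- A's loop body
def pvStepA (bd : PySem.Dict String (PySem.Dict String Int)) (entry : List (String × String)) :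
    PySem.Dict String (PySem.Dict String Int) :=
  let dtype := (PySem.Dict.ofList entry).getD "type" "unknown"
  let source := (PySem.Dict.ofList entry).getD "source" "unknown"
  if source == "ai" || source == "rules" then
    bd.insert dtype ((bd.getD dtype (PySem.Dict.ofList [("ai", 0), ("rules", 0)])).modify source 0 (· + 1))
  else bd

lemma pvSpec_keys (v : List (String × String)) :
    (pvSpec v).keys = PySem.Set.ofList (v.map Prod.fst) := by
  simp [pvSpec, PySem.Dict.keys, Function.comp_def]

lemma pvSpec_nodup (v : List (String × String)) : (pvSpec v).keys.Nodup := by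
  rw [pvSpec_keys]; exact PySem.Set.nodup_ofList _

lemma pvSpec_contains (v : List (String × String)) (t : String) :
    (pvSpec v).contains t = true ↔ t ∈ v.map Prod.fst := by
  rw [PySem.Dict.contains_iff_mem_keys, pvSpec_keys, PySem.Set.mem_ofList]

lemma pvSpec_getD_mem (v : List (String × String)) (t : String) (h : t ∈ v.map Prod.fst) :
    (pvSpec v).getD t (PySem.Dict.ofList [("ai", 0), ("rules", 0)]) = PySem.Dict.mk (pvRow v t) := by
  have hm : (t, PySem.Dict.mk (pvRow v t)) ∈ (pvSpec v).items := by
    simp only [pvSpec]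
    exact List.mem_map_of_mem ((PySem.Set.mem_ofList _ _).2 h)
  exact PySem.Dict.getD_of_mem_items _ hm (pvSpec_nodup v) _

lemma pvDefault_eval : (PySem.Dict.ofList [("ai", (0:Int)), ("rules", 0)]) = PySem.Dict.mk [("ai", 0), ("rules", 0)] := by
  decide

lemma pvRow_append_ne (v : List (String × String)) (t u s : String) (h : t ≠ u) :
    pvRow (v ++ [(t, s)]) u = pvRow v u := by
  simp [pvRow, List.countP_append, h]

lemma pvRow_zero (v : List (String × String)) (t : String) (h : t ∉ v.map Prod.fst) :
    pvRow v t = [("ai", 0), ("rules", 0)] := by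
  have h0 : ∀ (q : String → Bool), v.countP (fun p => p.1 == t && q p.2) = 0 := by
    intro q
    apply List.countP_eq_zero.2
    intro p hp
    have : p.1 ≠ t := by
      intro e; exact h (e ▸ List.mem_map_of_mem hp)
    simp [this]
  have ha := h0 (fun s => s == "ai")
  have hr := h0 (fun s => s == "rules")
  simp only [pvRow, ha, hr, Int.natCast_zero]

lemma pvModify_append (v : List (String × String)) (t s : String) (hs : s = "ai" ∨ s = "rules") :
    (PySem.Dict.mk (pvRow v t)).modify s 0 (· + 1) = PySem.Dict.mk (pvRow (v ++ [(t, s)]) t) := by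
  rcases hs with h | h <;> subst h <;>
    simp [pvRow, PySem.Dict.modify, PySem.Dict.insert, PySem.Dict.getD, PySem.Dict.get?,
      List.countP_append]

lemma pvGetD_modify (v : List (String × String)) (t s : String) (hs : s = "ai" ∨ s = "rules") :
    ((pvSpec v).getD t (PySem.Dict.ofList [("ai", 0), ("rules", 0)])).modify s 0 (· + 1)
      = PySem.Dict.mk (pvRow (v ++ [(t, s)]) t) := by
  by_cases ht : t ∈ v.map Prod.fst
  · rw [pvSpec_getD_mem v t ht, pvModify_append v t s hs]
  · have hc : (pvSpec v).contains t = false := by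
      rw [Bool.eq_false_iff]
      intro hcc
      exact ht ((pvSpec_contains v t).1 hcc)
    rw [PySem.Dict.getD_of_not_contains _ _ hc, pvDefault_eval, ← pvRow_zero v t ht,
      pvModify_append v t s hs]

lemma pvInsert_spec (v : List (String × String)) (t s : String) (_hs : s = "ai" ∨ s = "rules") :
    (pvSpec v).insert t (PySem.Dict.mk (pvRow (v ++ [(t, s)]) t)) = pvSpec (v ++ [(t, s)]) := by
  have hfst : (v ++ [(t, s)]).map Prod.fst = v.map Prod.fst ++ [t] := by simp
  apply PySem.Dict.ext
  by_cases ht : t ∈ v.map Prod.fst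
  · rw [PySem.Dict.items_insert_of_contains _ _ ((pvSpec_contains v t).2 ht)]
    have hof : PySem.Set.ofList ((v ++ [(t, s)]).map Prod.fst) = PySem.Set.ofList (v.map Prod.fst) := by
      rw [hfst, PySem.Set.ofList_append_singleton,
        PySem.Set.add_of_mem ((PySem.Set.mem_ofList _ _).2 ht)]
    simp only [pvSpec, List.map_map, hof]
    apply List.map_congr_left
    intro u _
    by_cases hut : u = t
    · subst hut; simp
    · have hbe : (u == t) = false := by simp [hut]
      simp [hut, pvRow_append_ne v t u s (Ne.symm hut)]
  · have hc : (pvSpec v).contains t = false := by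
      rw [Bool.eq_false_iff]
      intro hcc
      exact ht ((pvSpec_contains v t).1 hcc)
    rw [PySem.Dict.items_insert_of_not_contains _ _ hc]
    have hof2 : PySem.Set.ofList (v.map Prod.fst ++ [t])
        = PySem.Set.ofList (v.map Prod.fst) ++ [t] := by
      rw [PySem.Set.ofList_append_singleton,
        PySem.Set.add_of_not_mem (fun hm => ht ((PySem.Set.mem_ofList _ _).1 hm))]
    simp only [pvSpec, hfst, hof2, List.map_append, List.map_cons, List.map_nil]
    congr 1
    apply List.map_congr_left
    intro u hu
    have hut : t ≠ u := by
      intro he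
      exact ht ((PySem.Set.mem_ofList _ _).1 (he ▸ hu))
    rw [pvRow_append_ne v t u s hut]

lemma pvStepA_eq (bd : PySem.Dict String (PySem.Dict String Int)) (e : List (String × String)) :
    pvStepA bd e = if (pvPair e).2 == "ai" || (pvPair e).2 == "rules" then
        bd.insert (pvPair e).1
          ((bd.getD (pvPair e).1 (PySem.Dict.ofList [("ai", 0), ("rules", 0)])).modify (pvPair e).2 0 (· + 1))
      else bd := rfl

lemma pvStep_spec (v : List (String × String)) (e : List (String × String)) :
    pvStepA (pvSpec v) e = pvSpec (v ++ (pvValid [e])) := by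
  have hval : pvValid [e] = if (pvPair e).2 == "ai" || (pvPair e).2 == "rules"
      then [pvPair e] else [] := by
    simp only [pvValid, List.map_cons, List.map_nil, List.filter]
    cases h : ((pvPair e).2 == "ai" || (pvPair e).2 == "rules") <;> simp
  rw [pvStepA_eq, hval]
  by_cases hp : ((pvPair e).2 == "ai" || (pvPair e).2 == "rules") = true
  · have hs : (pvPair e).2 = "ai" ∨ (pvPair e).2 = "rules" := by
      simpa using hp
    rw [if_pos hp, if_pos hp, pvGetD_modify v (pvPair e).1 (pvPair e).2 hs]
    have := pvInsert_spec v (pvPair e).1 (pvPair e).2 hs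
    simpa using this
  · rw [if_neg hp, if_neg hp, List.append_nil]

lemma pvFoldA (history : List (List (String × String))) :
    history.foldl pvStepA PySem.Dict.empty = pvSpec (pvValid history) := by
  induction history using List.reverseRecOn with
  | nil => rfl
  | append_singleton hs e ih =>
      rw [List.foldl_append, List.foldl_cons, List.foldl_nil, ih, pvStep_spec]
      simp [pvValid]

-- B's key-collection loop builds exactly the set of first components
lemma pvTypes_eq (v : List (String × String)) :
    v.foldl (fun acc p => if acc.contains p.1 then acc else acc ++ [p.1]) ([] : List String)
      = PySem.Set.ofList (v.map Prod.fst) := by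
  rw [← PySem.Set.update_empty]
  exact (PySem.Set.update_map_eq_foldl_add v Prod.fst []).symm

-- ===== VERDICT (by name: the statement is the Claim_ definition above) =====
theorem decision_type_breakdown_py_spec : Claim_equal_decision_type_breakdown_py := by
  intro history _
  show decision_type_breakdown_py history = decision_type_breakdown_py_alt history
  have hA : decision_type_breakdown_py history
      = (history.foldl pvStepA PySem.Dict.empty).items.map (fun p => (p.1, p.2.items)) := rfl
  rw [hA, pvFoldA]
  show (pvSpec (pvValid history)).items.map (fun p => (p.1, p.2.items))
      = ((pvValid history).foldl (fun acc p => if acc.contains p.1 then acc else acc ++ [p.1])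
          ([] : List String)).map
          (fun t => (t, [("ai", ((pvValid history).countP (fun p => p.1 == t && p.2 == "ai") : Int)),
                         ("rules", ((pvValid history).countP (fun p => p.1 == t && p.2 == "rules") : Int))]))
  rw [pvTypes_eq]
  simp only [pvSpec, List.map_map]
  apply List.map_congr_left
  intro u _
  rfl
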